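-- pv_equiv track=rewrite | github.com/xlr8x/scribe_sumgen | notebooks/02_soap_agent_databricks_models.py | _parse_soap_sections
-- ===== SOURCE A (Python) =====
-- from typing import Dict, List, Any, Optional
--
-- def _parse_soap_sections(soap_note: str) -> Dict[str, str]:
--     """Extract SOAP sections from generated note"""
--     sections = {}
--     current_section = None
--     current_content = []
--
--     for line in soap_note.split('\n'):
--         if '**SUBJECTIVE**' in line:
--             if current_section and current_content:
--                 sections[current_section] = '\n'.join(current_content).strip()
--             current_section = 'subjective'
--             current_content = []
--         elif '**OBJECTIVE**' in line:
--             if current_section and current_content: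
--                 sections[current_section] = '\n'.join(current_content).strip()
--             current_section = 'objective'
--             current_content = []
--         elif '**ASSESSMENT**' in line:
--             if current_section and current_content:
--                 sections[current_section] = '\n'.join(current_content).strip()
--             current_section = 'assessment'
--             current_content = []
--         elif '**PLAN**' in line:
--             if current_section and current_content:
--                 sections[current_section] = '\n'.join(current_content).strip()
--             current_section = 'plan'
--             current_content = []
--         else:
--             if current_section:
--                 current_content.append(line)
--
--     # Add last section
--     if current_section and current_content:
--         sections[current_section] = '\n'.join(current_content).strip()
--
--     return sections
-- ===== SOURCE B (Python) =====
-- def _marker_name(line):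
--     if '**SUBJECTIVE**' in line:
--         return 'subjective'
--     if '**OBJECTIVE**' in line:
--         return 'objective'
--     if '**ASSESSMENT**' in line:
--         return 'assessment'
--     if '**PLAN**' in line:
--         return 'plan'
--     return None
--
--
-- def _parse_soap_sections(soap_note: str) -> dict:
--     # One backward pass cuts the note into (marker-name, following-lines) segments,
--     # then a forward pass stores each non-empty segment; no flush-on-transition state machine.
--     segments = []
--     pending = []
--     for line in reversed(soap_note.split('\n')):
--         name = _marker_name(line)
--         if name is None:
--             pending = [line] + pending
--         else:
--             segments = [(name, pending)] + segments
--             pending = []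
--     sections = {}
--     for name, content in segments:
--         if content:
--             sections[name] = '\n'.join(content).strip()
--     return sections
-- ===== Notes on version B (the rewrite author's own statement) =====
-- stated objective: alternative
-- what changed: Replaced A's flush-on-transition state machine (current section, accumulated content, flush on each marker and at the end) with a two-pass decomposition: one backward pass cuts the line list into (marker, following-lines) segments, then a forward pass stores each non-empty segment.
import Mathlib
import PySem

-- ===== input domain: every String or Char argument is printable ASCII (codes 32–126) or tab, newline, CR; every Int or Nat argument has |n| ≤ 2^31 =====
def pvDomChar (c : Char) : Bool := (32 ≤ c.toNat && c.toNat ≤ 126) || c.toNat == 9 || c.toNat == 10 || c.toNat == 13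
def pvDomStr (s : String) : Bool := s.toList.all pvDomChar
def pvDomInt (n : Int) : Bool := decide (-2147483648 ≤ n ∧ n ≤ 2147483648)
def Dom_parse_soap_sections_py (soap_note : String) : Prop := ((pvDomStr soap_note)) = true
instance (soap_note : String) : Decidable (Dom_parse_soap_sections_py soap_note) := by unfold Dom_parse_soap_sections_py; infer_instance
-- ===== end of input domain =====

-- B replaces A's flush-on-transition state machine by a backward segmentation pass plus a
-- storing pass (alternative decomposition, same asymptotic cost).

-- ===== PORT A =====
-- the repeated flush code 'if current_section and current_content: sections[current_section] = "\n".join(current_content).strip()'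
def pvFlushA (d : PySem.Dict String String) (cur : Option String) (content : List String) :
    PySem.Dict String String :=
  match cur with
  | some s => if content.isEmpty then d else d.insert s (PySem.Str.strip (PySem.Str.join "\n" content))
  | none => d

def pvStepA (st : PySem.Dict String String × Option String × List String) (line : String) :
    PySem.Dict String String × Option String × List String :=
  if PySem.Str.isIn "**SUBJECTIVE**" line then (pvFlushA st.1 st.2.1 st.2.2, some "subjective", [])
  else if PySem.Str.isIn "**OBJECTIVE**" line then (pvFlushA st.1 st.2.1 st.2.2, some "objective", [])
  else if PySem.Str.isIn "**ASSESSMENT**" line then (pvFlushA st.1 st.2.1 st.2.2, some "assessment", [])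
  else if PySem.Str.isIn "**PLAN**" line then (pvFlushA st.1 st.2.1 st.2.2, some "plan", [])
  else match st.2.1 with
    | some _ => (st.1, st.2.1, st.2.2 ++ [line])
    | none => (st.1, st.2.1, st.2.2)

def parse_soap_sections_py (soap_note : String) : List (String × String) :=
  let fin := ((PySem.Str.split? soap_note "\n").getD []).foldl pvStepA (PySem.Dict.empty, none, [])
  (pvFlushA fin.1 fin.2.1 fin.2.2).items

-- ===== PORT B =====
def pvMarker (line : String) : Option String :=
  if PySem.Str.isIn "**SUBJECTIVE**" line then some "subjective"
  else if PySem.Str.isIn "**OBJECTIVE**" line then some "objective"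
  else if PySem.Str.isIn "**ASSESSMENT**" line then some "assessment"
  else if PySem.Str.isIn "**PLAN**" line then some "plan"
  else none

-- one step of B's backward loop over reversed(lines); state = (segments, pending)
def pvStepB (st : List (String × List String) × List String) (line : String) :
    List (String × List String) × List String :=
  match pvMarker line with
  | none => (st.1, line :: st.2)
  | some name => ((name, st.2) :: st.1, [])

-- B's storing pass: 'if content: sections[name] = "\n".join(content).strip()'
def pvStore (d : PySem.Dict String String) (seg : String × List String) :
    PySem.Dict String String :=
  if seg.2.isEmpty then d else d.insert seg.1 (PySem.Str.strip (PySem.Str.join "\n" seg.2))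

def parse_soap_sections_py_alt (soap_note : String) : List (String × String) :=
  let segs := (((PySem.Str.split? soap_note "\n").getD []).reverse.foldl pvStepB ([], [])).1
  (segs.foldl pvStore PySem.Dict.empty).items

-- ===== PRECONDITION & SPEC =====
def Spec_parse_soap_sections_py (soap_note : String) (out : List (String × String)) : Prop := out = parse_soap_sections_py_alt soap_note
instance (soap_note : String) (out : List (String × String)) : Decidable (Spec_parse_soap_sections_py soap_note out) := by unfold Spec_parse_soap_sections_py; infer_instance

-- ===== CLAIM (what is proved, stated in full; the proofs are below) =====
def Claim_equal_parse_soap_sections_py : Prop := ∀ (soap_note : String), Dom_parse_soap_sections_py soap_note → Spec_parse_soap_sections_py soap_note (parse_soap_sections_py soap_note)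

-- ===== LEMMAS AND PROOFS =====

-- structural form of B's backward pass: (segments, prefix-before-first-marker)
def pvSplit : List String → List (String × List String) × List String
  | [] => ([], [])
  | l :: rest =>
    let r := pvSplit rest
    match pvMarker l with
    | none => (r.1, l :: r.2)
    | some n => ((n, r.2) :: r.1, [])

lemma pvFoldB_eq_split (lines : List String) :
    lines.foldr (fun x y => pvStepB y x) ([], []) = pvSplit lines := by
  induction lines with
  | nil => rfl
  | cons l rest ih =>
    rw [List.foldr_cons, ih]
    cases h : pvMarker l <;> simp [pvStepB, pvSplit, h]

lemma pvStepA_eq (st : PySem.Dict String String × Option String × List String) (line : String) :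
    pvStepA st line =
      match pvMarker line with
      | some n => (pvFlushA st.1 st.2.1 st.2.2, some n, [])
      | none => match st.2.1 with
        | some _ => (st.1, st.2.1, st.2.2 ++ [line])
        | none => (st.1, st.2.1, st.2.2) := by
  unfold pvStepA pvMarker
  split_ifs <;> rfl

lemma pvFoldA_some (lines : List String) :
    ∀ (d : PySem.Dict String String) (s : String) (c : List String),
      pvFlushA (lines.foldl pvStepA (d, some s, c)).1
          (lines.foldl pvStepA (d, some s, c)).2.1 (lines.foldl pvStepA (d, some s, c)).2.2 =
        ((s, c ++ (pvSplit lines).2) :: (pvSplit lines).1).foldl pvStore d := by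
  induction lines with
  | nil =>
    intro d s c
    simp [pvSplit, pvFlushA, pvStore]
  | cons l rest ih =>
    intro d s c
    rw [List.foldl_cons, pvStepA_eq]
    cases h : pvMarker l with
    | none =>
      simp only [ih]
      simp [pvSplit, h, pvStore]
    | some n =>
      simp only [ih]
      simp [pvSplit, h, pvStore, pvFlushA]

lemma pvFoldA_none (lines : List String) (d : PySem.Dict String String) :
    pvFlushA (lines.foldl pvStepA (d, none, [])).1
        (lines.foldl pvStepA (d, none, [])).2.1 (lines.foldl pvStepA (d, none, [])).2.2 =
      (pvSplit lines).1.foldl pvStore d := by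
  induction lines generalizing d with
  | nil => rfl
  | cons l rest ih =>
    rw [List.foldl_cons, pvStepA_eq]
    cases h : pvMarker l with
    | none => simp only [ih, pvSplit, h]
    | some n =>
      have hs := pvFoldA_some rest (pvFlushA d none []) n []
      rw [hs]
      simp [pvSplit, h, pvFlushA, pvStore]

-- ===== VERDICT (by name: the statement is the Claim_ definition above) =====
theorem parse_soap_sections_py_spec : Claim_equal_parse_soap_sections_py := by
  intro soap_note _
  unfold Spec_parse_soap_sections_py
  simp only [parse_soap_sections_py, parse_soap_sections_py_alt]
  rw [List.foldl_reverse, pvFoldB_eq_split, pvFoldA_none]
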